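-- pv_equiv track=rewrite | github.com/antonkrupin/algorithms | odometer.py | odometer
-- ===== SOURCE A (Python) =====
-- def odometer(oksana = []):
--     distance = 0
--     hours = []
--     speed = []
--     i = 0
--     while(i < len(oksana)):
--         if(i == 1):
--             hours.append(oksana[i])
--         else:
--             if(i%2 != 0):
--                 hours.append(oksana[i] - oksana[i-2])
--         i = i + 1
--
--     i = 0
--     while(i < len(oksana)):
--         if(i%2 == 0):
--             speed.append(oksana[i])
--         i = i + 1
--
--     i = 0
--     while(i < len(hours)):
--         distance = distance + (speed[i] * hours[i])
--         i = i + 1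
--
--     return distance
-- ===== SOURCE B (Python) =====
-- def odometer(oksana = []):
--     distance = 0
--     prev = 0
--     cur_speed = 0
--     for i, x in enumerate(oksana):
--         if i % 2 == 0:
--             cur_speed = x
--         else:
--             distance += cur_speed * (x - prev)
--             prev = x
--     return distance
-- ===== Notes on version B (the rewrite author's own statement) =====
-- stated objective: simpler
-- what changed: Replaces A's three list-building passes (hours list, speed list, then a dot-product loop) by a single pass that accumulates the distance directly while tracking the previous odd reading and the current speed.
import Mathlib
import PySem

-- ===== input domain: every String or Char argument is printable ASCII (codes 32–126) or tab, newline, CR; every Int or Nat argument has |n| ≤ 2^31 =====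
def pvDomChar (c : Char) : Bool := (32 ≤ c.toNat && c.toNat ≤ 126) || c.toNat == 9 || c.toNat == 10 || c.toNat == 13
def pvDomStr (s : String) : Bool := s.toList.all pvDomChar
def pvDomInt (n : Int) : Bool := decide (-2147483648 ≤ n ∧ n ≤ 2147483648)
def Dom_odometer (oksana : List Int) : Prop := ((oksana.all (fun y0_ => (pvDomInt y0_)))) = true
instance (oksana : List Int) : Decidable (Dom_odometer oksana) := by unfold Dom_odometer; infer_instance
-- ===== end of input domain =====

-- B replaces A's three list-building passes by one direct accumulating pass (objective: simpler).

-- ===== PORT A =====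
def odometer (oksana : List Int) : Int :=
  let n : Int := oksana.length
  let hours : List Int :=
    (PySem.List.pyRange 0 n 1).foldl (fun hs i =>
      if i == 1 then hs ++ [PySem.List.pyGetD oksana i 0]
      else if i % 2 != 0 then
        hs ++ [PySem.List.pyGetD oksana i 0 - PySem.List.pyGetD oksana (i - 2) 0]
      else hs) []
  let speed : List Int :=
    (PySem.List.pyRange 0 n 1).foldl (fun ss i =>
      if i % 2 == 0 then ss ++ [PySem.List.pyGetD oksana i 0] else ss) []
  (PySem.List.pyRange 0 (hours.length : Int) 1).foldl (fun d i =>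
    d + PySem.List.pyGetD speed i 0 * PySem.List.pyGetD hours i 0) 0

-- ===== PORT B =====
def odometer_alt (oksana : List Int) : Int :=
  ((PySem.List.enumerate oksana).foldl
    (fun (st : Int × Int × Int) (ix : Int × Int) =>
      if ix.1 % 2 == 0 then (st.1, st.2.1, ix.2)
      else (st.1 + st.2.2 * (ix.2 - st.2.1), ix.2, st.2.2))
    (0, 0, 0)).1

-- ===== PRECONDITION & SPEC =====
def Spec_odometer (oksana : List Int) (out : Int) : Prop := out = odometer_alt oksana
instance (oksana : List Int) (out : Int) : Decidable (Spec_odometer oksana out) := by unfold Spec_odometer; infer_instance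

-- ===== CLAIM (what is proved, stated in full; the proofs are below) =====
def Claim_equal_odometer : Prop := ∀ (oksana : List Int), Dom_odometer oksana → Spec_odometer oksana (odometer oksana)

-- ===== LEMMAS AND PROOFS =====

/-- Common reference recursion: speed·(odd reading − previous odd reading), pairwise. -/
def gOdo : Int → List Int → Int
  | prev, s :: h :: t => s * (h - prev) + gOdo h t
  | _, [] => 0
  | _, [_] => 0

/-- Index-sum form of A's result. -/
def sOdo (prev : Int) (l : List Int) : Int :=
  ((List.range (l.length / 2)).map (fun k =>
     l.getD (2 * k) 0 *
       (l.getD (2 * k + 1) 0 - if k = 0 then prev else l.getD (2 * k - 1) 0))).sum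

lemma filter_odd_pyRange (n : Nat) :
    (PySem.List.pyRange 0 (n : Int) 1).filter (fun i => i % 2 != 0)
      = (List.range (n / 2)).map (fun k => ((2 * k + 1 : Nat) : Int)) := by
  induction n with
  | zero => simp
  | succ m ih =>
    have hcast : ((m + 1 : Nat) : Int) = (m : Int) + 1 := by push_cast; ring
    have h : PySem.List.pyRange 0 ((m : Int) + 1) 1
        = PySem.List.pyRange 0 (m : Int) 1 ++ [(m : Int)] :=
      PySem.List.pyRange_one_succ_right (by positivity)
    rw [hcast, h, List.filter_append, ih]
    by_cases hpar : m % 2 = 0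
    · have hmod : (((m : Int)) % 2 != 0) = false := by simp; omega
      have hm : (m + 1) / 2 = m / 2 := by omega
      simp [hmod, hm]
    · have hmod : (((m : Int)) % 2 != 0) = true := by simp; omega
      have hm : (m + 1) / 2 = m / 2 + 1 := by omega
      have hv : 2 * (m / 2) + 1 = m := by omega
      rw [hm, List.range_succ, List.map_append]
      simp [hmod]
      omega

lemma filter_even_pyRange (n : Nat) :
    (PySem.List.pyRange 0 (n : Int) 1).filter (fun i => i % 2 == 0)
      = (List.range ((n + 1) / 2)).map (fun k => ((2 * k : Nat) : Int)) := by
  induction n with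
  | zero => simp
  | succ m ih =>
    have hcast : ((m + 1 : Nat) : Int) = (m : Int) + 1 := by push_cast; ring
    have h : PySem.List.pyRange 0 ((m : Int) + 1) 1
        = PySem.List.pyRange 0 (m : Int) 1 ++ [(m : Int)] :=
      PySem.List.pyRange_one_succ_right (by positivity)
    rw [hcast, h, List.filter_append, ih]
    by_cases hpar : m % 2 = 0
    · have hmod : (((m : Int)) % 2 == 0) = true := by simp; omega
      have hm : (m + 1 + 1) / 2 = (m + 1) / 2 + 1 := by omega
      have hv : 2 * ((m + 1) / 2) = m := by omega
      rw [hm, List.range_succ, List.map_append]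
      simp [hmod]
      omega
    · have hmod : (((m : Int)) % 2 == 0) = false := by simp; omega
      have hm : (m + 1 + 1) / 2 = (m + 1) / 2 := by omega
      simp [hmod, hm]

lemma odometer_eq_sOdo (l : List Int) : odometer l = sOdo 0 l := by
  have hbody : (fun (hs : List Int) (i : Int) =>
      if i == 1 then hs ++ [PySem.List.pyGetD l i 0]
      else if i % 2 != 0 then
        hs ++ [PySem.List.pyGetD l i 0 - PySem.List.pyGetD l (i - 2) 0]
      else hs)
      = (fun (hs : List Int) (i : Int) =>
        if i % 2 != 0 then
          hs ++ [if i == 1 then PySem.List.pyGetD l 1 0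
                 else PySem.List.pyGetD l i 0 - PySem.List.pyGetD l (i - 2) 0]
        else hs) := by
    funext hs i
    by_cases hi : i = 1
    · subst hi; simp
    · simp [hi]
  have hhours : (PySem.List.pyRange 0 (l.length : Int) 1).foldl
      (fun hs i =>
        if i == 1 then hs ++ [PySem.List.pyGetD l i 0]
        else if i % 2 != 0 then
          hs ++ [PySem.List.pyGetD l i 0 - PySem.List.pyGetD l (i - 2) 0]
        else hs) []
      = (List.range (l.length / 2)).map (fun k =>
          if ((2 * k + 1 : Nat) : Int) == 1 then PySem.List.pyGetD l 1 0
          else PySem.List.pyGetD l ((2 * k + 1 : Nat) : Int) 0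
            - PySem.List.pyGetD l (((2 * k + 1 : Nat) : Int) - 2) 0) := by
    rw [hbody, PySem.List.foldl_append_if, filter_odd_pyRange, List.map_map]
    rfl
  have hspeed : (PySem.List.pyRange 0 (l.length : Int) 1).foldl
      (fun ss i => if i % 2 == 0 then ss ++ [PySem.List.pyGetD l i 0] else ss) []
      = (List.range ((l.length + 1) / 2)).map
          (fun k => PySem.List.pyGetD l ((2 * k : Nat) : Int) 0) := by
    rw [PySem.List.foldl_append_if, filter_even_pyRange, List.map_map]
    rfl
  simp only [odometer]
  rw [hhours, hspeed, List.length_map, List.length_range, PySem.List.foldl_add,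
    PySem.List.pyRange_zero_nat, List.map_map, zero_add, sOdo]
  refine congrArg List.sum (List.map_congr_left ?_)
  intro k hk
  rw [List.mem_range] at hk
  simp only [Function.comp_apply, PySem.List.pyGetD_natCast]
  rw [PySem.List.getD_map_range _ _ _ _ (by omega), PySem.List.getD_map_range _ _ _ _ hk]
  cases k with
  | zero => simp [PySem.List.pyGetD_ofNat']
  | succ j =>
    have hc : (((2 * (j + 1) + 1 : Nat) : Int) == 1) = false := by
      simp; omega
    have e : ((2 * (j + 1) + 1 : Nat) : Int) - 2 = ((2 * (j + 1) - 1 : Nat) : Int) := by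
      push_cast; omega
    rw [hc]
    simp only [Bool.false_eq_true, if_false, e, PySem.List.pyGetD_natCast]
    simp

lemma sOdo_eq_gOdo : ∀ (prev : Int) (l : List Int), sOdo prev l = gOdo prev l := by
  intro prev l
  induction prev, l using gOdo.induct with
  | case2 prev => simp [sOdo, gOdo]
  | case3 prev x => simp [sOdo, gOdo]
  | case1 prev s h t ih =>
    have hlen : (s :: h :: t).length / 2 = t.length / 2 + 1 := by simp; omega
    rw [sOdo, hlen, List.range_succ_eq_map, List.map_cons, List.map_map, List.sum_cons]
    have htail :
        List.map ((fun k =>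
            (s :: h :: t).getD (2 * k) 0 *
              ((s :: h :: t).getD (2 * k + 1) 0 -
                if k = 0 then prev else (s :: h :: t).getD (2 * k - 1) 0)) ∘ Nat.succ)
          (List.range (t.length / 2))
        = List.map (fun k =>
            t.getD (2 * k) 0 *
              (t.getD (2 * k + 1) 0 - if k = 0 then h else t.getD (2 * k - 1) 0))
          (List.range (t.length / 2)) := by
      refine List.map_congr_left ?_
      intro k _
      have e1 : 2 * Nat.succ k = 2 * k + 1 + 1 := by omega
      have e2 : 2 * Nat.succ k + 1 = 2 * k + 1 + 1 + 1 := by omega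
      have e3 : 2 * Nat.succ k - 1 = 2 * k + 1 := by omega
      simp only [Function.comp_apply, e1, List.getD_cons_succ, Nat.succ_ne_zero,
        if_false]
      cases k with
      | zero => simp
      | succ j =>
        have e4 : 2 * (j + 1) = 2 * j + 1 + 1 := by omega
        have e5 : 2 * (j + 1) - 1 = 2 * j + 1 := by omega
        simp only [e4]
        simp
    rw [htail, ← sOdo, ih]
    simp [gOdo]

lemma alt_loop : ∀ (prev : Int) (l : List Int) (m : Nat) (d c : Int),
    ((PySem.List.enumerate l (2 * (m : Int))).foldl
      (fun (st : Int × Int × Int) (ix : Int × Int) =>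
        if ix.1 % 2 == 0 then (st.1, st.2.1, ix.2)
        else (st.1 + st.2.2 * (ix.2 - st.2.1), ix.2, st.2.2))
      (d, prev, c)).1 = d + gOdo prev l := by
  intro prev l
  induction prev, l using gOdo.induct with
  | case1 prev s h t ih =>
    intro m d c
    have h0 : ((2 * (m : Int)) % 2 == 0) = true := by simp
    have h1 : ((2 * (m : Int) + 1) % 2 == 0) = false := by simp
    have h2 : (2 * (m : Int) + 1 + 1) = 2 * ((m + 1 : Nat) : Int) := by push_cast; ring
    simp only [PySem.List.enumerate_cons, List.foldl_cons, h0, h1, h2, if_true,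
      Bool.false_eq_true, if_false]
    rw [ih (m + 1)]
    simp only [gOdo]
    ring
  | case2 prev =>
    intro m d c
    simp [PySem.List.enumerate_nil, gOdo]
  | case3 prev x =>
    intro m d c
    simp [PySem.List.enumerate_cons, PySem.List.enumerate_nil, gOdo]

lemma odometer_alt_eq_gOdo (l : List Int) : odometer_alt l = gOdo 0 l := by
  have h := alt_loop 0 l 0 0 0
  simpa [odometer_alt] using h

-- ===== VERDICT (by name: the statement is the Claim_ definition above) =====
theorem odometer_spec : Claim_equal_odometer := by
  intro l _
  show odometer l = odometer_alt l
  rw [odometer_eq_sOdo, sOdo_eq_gOdo, odometer_alt_eq_gOdo]
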